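-- pv_equiv track=rewrite | github.com/MrBrantCode/unitest_baseline | mut_generate/mist_train_taco/taco_2215/solution.py | min_operations_to_transform
-- ===== SOURCE A (Python) =====
-- def min_operations_to_transform(str1: str, str2: str) -> int:
--     n = len(str1)
--     m = len(str2)
--
--     # Create a 2D DP array initialized to 0
--     dp = [[0 for _ in range(m + 1)] for _ in range(n + 1)]
--
--     # Fill the DP table
--     for i in range(1, n + 1):
--         for j in range(1, m + 1):
--             if str1[i - 1] == str2[j - 1]:
--                 dp[i][j] = 1 + dp[i - 1][j - 1]
--             else:
--                 dp[i][j] = max(dp[i - 1][j], dp[i][j - 1])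
--
--     # Length of the longest common subsequence
--     lcs = dp[n][m]
--
--     # Minimum operations required
--     return n - lcs + (m - lcs)
-- ===== SOURCE B (Python) =====
-- def min_operations_to_transform(str1: str, str2: str) -> int:
--     # top-down LCS: recursive lcs(i, j) over index pairs, memoized in a dict,
--     # started from the single pair (n, m) -- no bottom-up table is filled
--     memo = {}
--
--     def lcs(i, j):
--         if i == 0 or j == 0:
--             return 0
--         if (i, j) in memo:
--             return memo[(i, j)]
--         if str1[i - 1] == str2[j - 1]:
--             res = 1 + lcs(i - 1, j - 1)
--         else:
--             res = max(lcs(i - 1, j), lcs(i, j - 1))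
--         memo[(i, j)] = res
--         return res
--
--     n, m = len(str1), len(str2)
--     return n + m - 2 * lcs(n, m)
-- ===== Notes on version B (the rewrite author's own statement) =====
-- stated objective: alternative
-- what changed: Replaces A's bottom-up fill of the whole (n+1)x(m+1) DP table by top-down recursion lcs(i,j) over index pairs with a dict memo, started from (n,m) and returning n+m-2*lcs(n,m); only reachable subproblems are computed and no 2D table exists.
import Mathlib
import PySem

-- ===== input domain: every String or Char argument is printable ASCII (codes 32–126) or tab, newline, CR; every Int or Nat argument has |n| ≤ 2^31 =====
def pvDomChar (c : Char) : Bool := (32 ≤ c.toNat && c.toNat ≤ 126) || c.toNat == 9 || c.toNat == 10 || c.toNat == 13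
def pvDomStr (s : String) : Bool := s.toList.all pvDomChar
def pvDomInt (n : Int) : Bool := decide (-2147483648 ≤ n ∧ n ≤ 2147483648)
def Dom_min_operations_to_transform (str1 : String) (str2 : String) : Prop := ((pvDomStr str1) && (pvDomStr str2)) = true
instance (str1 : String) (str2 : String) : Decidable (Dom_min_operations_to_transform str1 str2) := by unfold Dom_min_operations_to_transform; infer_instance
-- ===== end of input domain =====

-- B replaces A's bottom-up DP table by top-down memoized recursion lcs(i,j) over index pairs (alternative decomposition, same cost).

-- ===== PORT A =====
-- All indices i-1, j-1, i, j taken from range(1, n+1)/range(1, m+1) are in bounds of the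
-- lists they index, so the total pyGetD/pySetD forms are exact here (Python never raises).
def min_operations_to_transform (str1 : String) (str2 : String) : Int :=
  let s1 := str1.toList
  let s2 := str2.toList
  let n : Int := s1.length
  let m : Int := s2.length
  -- dp = [[0 for _ in range(m+1)] for _ in range(n+1)]
  let dp : List (List Int) :=
    (PySem.List.pyRange 0 (n + 1) 1).map (fun _ =>
      (PySem.List.pyRange 0 (m + 1) 1).map (fun _ => (0 : Int)))
  let dp := (PySem.List.pyRange 1 (n + 1) 1).foldl (fun dp i =>
    (PySem.List.pyRange 1 (m + 1) 1).foldl (fun dp j =>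
      let v : Int :=
        if PySem.List.pyGetD s1 (i - 1) ' ' = PySem.List.pyGetD s2 (j - 1) ' ' then
          1 + PySem.List.pyGetD (PySem.List.pyGetD dp (i - 1) []) (j - 1) 0
        else
          max (PySem.List.pyGetD (PySem.List.pyGetD dp (i - 1) []) j 0)
              (PySem.List.pyGetD (PySem.List.pyGetD dp i []) (j - 1) 0)
      PySem.List.pySetD dp i (PySem.List.pySetD (PySem.List.pyGetD dp i []) j v)) dp) dp
  let lcs := PySem.List.pyGetD (PySem.List.pyGetD dp n []) m 0
  n - lcs + (m - lcs)

-- ===== PORT B =====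
-- Source B's inner 'def lcs(i, j)' with its dict 'memo': the mutated dict is threaded as
-- state, so each call returns (value, memo). The guard i == 0 or j == 0 keeps the
-- indices i-1, j-1 in bounds, so str1[i-1]/str2[j-1] is the in-bounds element and the
-- total getD form is exact here.
def pvLcsMemo (s1 s2 : List Char) (i j : Nat) (memo : PySem.Dict (Nat × Nat) Int) :
    Int × PySem.Dict (Nat × Nat) Int :=
  if _h : i = 0 ∨ j = 0 then (0, memo)
  else
    match memo.get? (i, j) with
    | some v => (v, memo)
    | none =>
      let p :=
        if s1.getD (i - 1) ' ' = s2.getD (j - 1) ' ' then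
          let q := pvLcsMemo s1 s2 (i - 1) (j - 1) memo
          (1 + q.1, q.2)
        else
          let q1 := pvLcsMemo s1 s2 (i - 1) j memo
          let q2 := pvLcsMemo s1 s2 i (j - 1) q1.2
          (max q1.1 q2.1, q2.2)
      (p.1, p.2.insert (i, j) p.1)
termination_by i + j
decreasing_by all_goals omega

def min_operations_to_transform_alt (str1 : String) (str2 : String) : Int :=
  let s1 := str1.toList
  let s2 := str2.toList
  let n := s1.length
  let m := s2.length
  (n : Int) + (m : Int) - 2 * (pvLcsMemo s1 s2 n m PySem.Dict.empty).1

-- ===== PRECONDITION & SPEC =====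
def Spec_min_operations_to_transform (str1 : String) (str2 : String) (out : Int) : Prop := out = min_operations_to_transform_alt str1 str2
instance (str1 : String) (str2 : String) (out : Int) : Decidable (Spec_min_operations_to_transform str1 str2 out) := by unfold Spec_min_operations_to_transform; infer_instance

-- ===== CLAIM (what is proved, stated in full; the proofs are below) =====
def Claim_equal_min_operations_to_transform : Prop := ∀ (str1 : String) (str2 : String), Dom_min_operations_to_transform str1 str2 → Spec_min_operations_to_transform str1 str2 (min_operations_to_transform str1 str2)


-- ===== LEMMAS AND PROOFS =====

-- Pure reference recurrence: LCS length of s1[:i] and s2[:j].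
def pvLcs (s1 s2 : List Char) (i j : Nat) : Int :=
  if i = 0 ∨ j = 0 then 0
  else if s1.getD (i - 1) ' ' = s2.getD (j - 1) ' ' then pvLcs s1 s2 (i - 1) (j - 1) + 1
  else max (pvLcs s1 s2 (i - 1) j) (pvLcs s1 s2 i (j - 1))
termination_by i + j
decreasing_by all_goals omega

lemma pvLcs_eq (s1 s2 : List Char) (i j : Nat) (h0 : ¬ (i = 0 ∨ j = 0)) :
    pvLcs s1 s2 i j =
      if s1.getD (i - 1) ' ' = s2.getD (j - 1) ' ' then pvLcs s1 s2 (i - 1) (j - 1) + 1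
      else max (pvLcs s1 s2 (i - 1) j) (pvLcs s1 s2 i (j - 1)) := by
  rw [pvLcs, if_neg h0]

-- The memo invariant: every stored value is the pure LCS value of its key.
def pvInv (s1 s2 : List Char) (memo : PySem.Dict (Nat × Nat) Int) : Prop :=
  ∀ a b v, memo.get? (a, b) = some v → v = pvLcs s1 s2 a b

lemma pvMemo_correct (s1 s2 : List Char) : ∀ (N i j : Nat), i + j ≤ N →
    ∀ memo, pvInv s1 s2 memo →
      (pvLcsMemo s1 s2 i j memo).1 = pvLcs s1 s2 i j ∧
      pvInv s1 s2 (pvLcsMemo s1 s2 i j memo).2 := by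
  intro N
  induction N with
  | zero =>
    intro i j hN memo hinv
    have h0 : i = 0 ∨ j = 0 := by omega
    rw [pvLcsMemo, pvLcs, dif_pos h0, if_pos h0]
    exact ⟨rfl, hinv⟩
  | succ N ih =>
    intro i j hN memo hinv
    by_cases h0 : i = 0 ∨ j = 0
    · rw [pvLcsMemo, pvLcs, dif_pos h0, if_pos h0]
      exact ⟨rfl, hinv⟩
    · rw [pvLcsMemo, dif_neg h0]
      cases hget : memo.get? (i, j) with
      | some v =>
        exact ⟨by simpa using hinv i j v hget, hinv⟩
      | none =>
        by_cases hc : s1.getD (i - 1) ' ' = s2.getD (j - 1) ' '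
        · rw [if_pos hc]
          obtain ⟨h1, h2⟩ := ih (i - 1) (j - 1) (by omega) memo hinv
          have hval : 1 + (pvLcsMemo s1 s2 (i - 1) (j - 1) memo).1 = pvLcs s1 s2 i j := by
            rw [h1, pvLcs_eq s1 s2 i j h0, if_pos hc]; ring
          refine ⟨hval, ?_⟩
          intro a b v hv
          rw [PySem.Dict.get?_insert] at hv
          split_ifs at hv with heq
          · cases hv
            have ha : a = i := congrArg Prod.fst heq
            have hb : b = j := congrArg Prod.snd heq
            subst ha; subst hb
            exact hval
          · exact h2 a b v hv
        · rw [if_neg hc]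
          obtain ⟨h1, h2⟩ := ih (i - 1) j (by omega) memo hinv
          obtain ⟨h3, h4⟩ := ih i (j - 1) (by omega) _ h2
          have hval : max (pvLcsMemo s1 s2 (i - 1) j memo).1
              (pvLcsMemo s1 s2 i (j - 1) (pvLcsMemo s1 s2 (i - 1) j memo).2).1
              = pvLcs s1 s2 i j := by
            rw [h1, h3, pvLcs_eq s1 s2 i j h0, if_neg hc]
          refine ⟨hval, ?_⟩
          intro a b v hv
          rw [PySem.Dict.get?_insert] at hv
          split_ifs at hv with heq
          · cases hv
            have ha : a = i := congrArg Prod.fst heq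
            have hb : b = j := congrArg Prod.snd heq
            subst ha; subst hb
            exact hval
          · exact h4 a b v hv

-- ===== A-side machinery: characterise A's fold by row recurrences =====

def pvGo (c : Char) : List Char → List (Int × Int) → Int → List Int
  | [], _, _ => []
  | _ :: _, [], _ => []
  | d :: ds, (l, u) :: ps, last =>
      (if c = d then l + 1 else max u last) :: pvGo c ds ps (if c = d then l + 1 else max u last)

def pvNext (c : Char) (s2 : List Char) (r : List Int) : List Int :=
  0 :: pvGo c s2 (r.zip r.tail) 0

def pvRow (s2 cs : List Char) : List Int :=
  cs.foldl (fun r c => pvNext c s2 r) (List.replicate (s2.length + 1) 0)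

def pvNew (s1 s2 : List Char) (k : Nat) : List Int :=
  pvNext (s1.getD k ' ') s2 (pvRow s2 (s1.take k))

def pvDp (s1 s2 : List Char) (k : Nat) : List (List Int) :=
  (List.range (s1.length + 1)).map (fun i =>
    if i ≤ k then pvRow s2 (s1.take i) else List.replicate (s2.length + 1) 0)

def pvInner (s1 s2 : List Char) (k t : Nat) : List (List Int) :=
  (List.range (s1.length + 1)).map (fun i =>
    if i ≤ k then pvRow s2 (s1.take i)
    else if i = k + 1 then
      (List.range (s2.length + 1)).map (fun x => if x ≤ t then (pvNew s1 s2 k).getD x 0 else 0)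
    else List.replicate (s2.length + 1) 0)

def pvBody (s1 s2 : List Char) (i : Int) (dp : List (List Int)) (j : Int) : List (List Int) :=
  let v : Int :=
    if PySem.List.pyGetD s1 (i - 1) ' ' = PySem.List.pyGetD s2 (j - 1) ' ' then
      1 + PySem.List.pyGetD (PySem.List.pyGetD dp (i - 1) []) (j - 1) 0
    else
      max (PySem.List.pyGetD (PySem.List.pyGetD dp (i - 1) []) j 0)
          (PySem.List.pyGetD (PySem.List.pyGetD dp i []) (j - 1) 0)
  PySem.List.pySetD dp i (PySem.List.pySetD (PySem.List.pyGetD dp i []) j v)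

lemma pvGo_length (c : Char) : ∀ (ds : List Char) (ps : List (Int × Int)) (last : Int),
    (pvGo c ds ps last).length = min ds.length ps.length := by
  intro ds
  induction ds with
  | nil => intro ps last; simp [pvGo]
  | cons d ds ih =>
    intro ps last
    cases ps with
    | nil => simp [pvGo]
    | cons p ps =>
      obtain ⟨l, u⟩ := p
      simp only [pvGo, List.length_cons, ih]
      omega

lemma pvNext_length (c : Char) (s2 : List Char) (r : List Int) (h : r.length = s2.length + 1) :
    (pvNext c s2 r).length = s2.length + 1 := by
  simp [pvNext, pvGo_length, h]

lemma pvRow_length (s2 : List Char) (cs : List Char) :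
    (pvRow s2 cs).length = s2.length + 1 := by
  suffices h : ∀ (r : List Int), r.length = s2.length + 1 →
      (cs.foldl (fun r c => pvNext c s2 r) r).length = s2.length + 1 by
    exact h _ (by simp)
  induction cs with
  | nil => intro r hr; simpa using hr
  | cons c cs ih =>
    intro r hr
    simp only [List.foldl_cons]
    exact ih _ (pvNext_length c s2 r hr)

lemma pvGetD_zip (l1 l2 : List Int) (t : Nat) (h1 : t < l1.length) (h2 : t < l2.length) :
    (l1.zip l2).getD t (0, 0) = (l1.getD t 0, l2.getD t 0) := by
  have hz : t < (l1.zip l2).length := by simp [List.length_zip]; omega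
  rw [List.getD_eq_getElem _ _ hz, List.getD_eq_getElem _ _ h1, List.getD_eq_getElem _ _ h2,
    List.getElem_zip]

lemma pvGetD_tail (l : List Int) (t : Nat) :
    l.tail.getD t 0 = l.getD (t + 1) 0 := by
  cases l <;> simp [List.getD]

lemma pvGo_getD (c : Char) : ∀ (t : Nat) (ds : List Char) (ps : List (Int × Int)) (last : Int),
    t < ds.length → t < ps.length →
    (pvGo c ds ps last).getD t 0 =
      if c = ds.getD t ' ' then (ps.getD t (0, 0)).1 + 1
      else max (ps.getD t (0, 0)).2
        (if t = 0 then last else (pvGo c ds ps last).getD (t - 1) 0) := by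
  intro t
  induction t with
  | zero =>
    intro ds ps last hds hps
    match ds, ps with
    | d :: ds, (l, u) :: ps => simp [pvGo]
  | succ t ih =>
    intro ds ps last hds hps
    match ds, ps with
    | d :: ds, (l, u) :: ps =>
      simp only [List.length_cons, Nat.add_lt_add_iff_right] at hds hps
      have h := ih ds ps (if c = d then l + 1 else max u last) hds hps
      simp only [pvGo, List.getD_cons_succ]
      rw [h]
      rcases Nat.eq_zero_or_pos t with ht | ht
      · subst ht; simp
      · have h1 : t ≠ 0 := by omega
        have h2 : ¬ t + 1 = 0 := by omega
        simp only [h1, h2, if_false]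
        have h3 : t + 1 - 1 = (t - 1) + 1 := by omega
        rw [h3]
        simp

lemma pvNext_getD (c : Char) (s2 : List Char) (prev : List Int)
    (hp : prev.length = s2.length + 1) (j : Nat) (hj0 : 1 ≤ j) (hj : j ≤ s2.length) :
    (pvNext c s2 prev).getD j 0 =
      if c = s2.getD (j - 1) ' ' then prev.getD (j - 1) 0 + 1
      else max (prev.getD j 0) ((pvNext c s2 prev).getD (j - 1) 0) := by
  obtain ⟨t, rfl⟩ : ∃ t, j = t + 1 := ⟨j - 1, by omega⟩
  have ht : t ≤ s2.length - 1 := by omega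
  have hzl : (prev.zip prev.tail).length = s2.length := by
    simp [List.length_zip, hp]
  have h := pvGo_getD c t s2 (prev.zip prev.tail) 0 (by omega) (by omega)
  have hz := pvGetD_zip prev prev.tail t (by omega) (by simp [hp]; omega)
  simp only [pvNext, List.getD_cons_succ, Nat.add_sub_cancel]
  rw [h, hz, pvGetD_tail]
  rcases Nat.eq_zero_or_pos t with h0 | h0
  · subst h0; simp
  · have h1 : t ≠ 0 := by omega
    simp only [h1, if_false]
    obtain ⟨u, rfl⟩ : ∃ u, t = u + 1 := ⟨t - 1, by omega⟩
    simp

lemma pvSet_map_range {α : Type} (f : Nat → α) (N t : Nat) (v : α) (_ht : t < N) :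
    ((List.range N).map f).set t v = (List.range N).map (fun x => if x = t then v else f x) := by
  apply List.ext_getElem
  · simp
  · intro i h1 h2
    simp only [List.length_set, List.length_map, List.length_range] at h1
    rw [List.getElem_set]
    simp only [List.getElem_map, List.getElem_range]
    split_ifs with h3 h4 h4
    · rfl
    · omega
    · omega
    · rfl

lemma pvRow_nil (s2 : List Char) : pvRow s2 [] = List.replicate (s2.length + 1) 0 := rfl

lemma pvNew_getD_zero (s1 s2 : List Char) (k : Nat) : (pvNew s1 s2 k).getD 0 0 = 0 := by
  simp [pvNew, pvNext]

lemma pvInner_step (s1 s2 : List Char) (k j : Nat) (hk : k < s1.length)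
    (hj0 : 1 ≤ j) (hj : j ≤ s2.length) :
    pvBody s1 s2 ((k : Int) + 1) (pvInner s1 s2 k (j - 1)) (j : Int) = pvInner s1 s2 k j := by
  have e1 : (k : Int) + 1 - 1 = ((k : Nat) : Int) := by ring
  have e2 : ((j : Nat) : Int) - 1 = ((j - 1 : Nat) : Int) := by omega
  have e3 : (k : Int) + 1 = ((k + 1 : Nat) : Int) := by push_cast; ring
  have hprevlen : (pvRow s2 (s1.take k)).length = s2.length + 1 := pvRow_length s2 _
  have hA : (pvInner s1 s2 k (j - 1)).getD k [] = pvRow s2 (s1.take k) := by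
    unfold pvInner
    rw [PySem.List.getD_map_range _ _ _ _ (by omega)]
    simp
  have hB : (pvInner s1 s2 k (j - 1)).getD (k + 1) [] =
      (List.range (s2.length + 1)).map (fun x => if x ≤ j - 1 then (pvNew s1 s2 k).getD x 0 else 0) := by
    unfold pvInner
    rw [PySem.List.getD_map_range _ _ _ _ (by omega)]
    simp
  have hC : ((List.range (s2.length + 1)).map
        (fun x => if x ≤ j - 1 then (pvNew s1 s2 k).getD x 0 else 0)).getD (j - 1) 0
      = (pvNew s1 s2 k).getD (j - 1) 0 := by
    rw [PySem.List.getD_map_range _ _ _ _ (by omega)]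
    simp
  have hv : (if s1.getD k ' ' = s2.getD (j - 1) ' '
        then 1 + (pvRow s2 (s1.take k)).getD (j - 1) 0
        else max ((pvRow s2 (s1.take k)).getD j 0) ((pvNew s1 s2 k).getD (j - 1) 0))
      = (pvNew s1 s2 k).getD j 0 := by
    have h := pvNext_getD (s1.getD k ' ') s2 (pvRow s2 (s1.take k)) hprevlen j hj0 hj
    have hnew : pvNew s1 s2 k = pvNext (s1.getD k ' ') s2 (pvRow s2 (s1.take k)) := rfl
    rw [hnew, h]
    split_ifs with hcc
    · ring
    · rfl
  unfold pvBody
  rw [e1, e2, e3]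
  simp only [PySem.List.pyGetD_natCast, PySem.List.pySetD_natCast]
  rw [hA, hB, hC, hv]
  rw [pvSet_map_range _ _ _ _ (by omega : j < s2.length + 1)]
  have hrow : (List.range (s2.length + 1)).map
        (fun x => if x = j then (pvNew s1 s2 k).getD j 0
          else if x ≤ j - 1 then (pvNew s1 s2 k).getD x 0 else 0)
      = (List.range (s2.length + 1)).map
        (fun x => if x ≤ j then (pvNew s1 s2 k).getD x 0 else 0) := by
    apply List.map_congr_left
    intro x _
    by_cases h1 : x = j
    · simp [h1]
    · have h2 : (x ≤ j - 1) = (x ≤ j) := by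
        apply propext; constructor <;> intro <;> omega
      simp [h1, h2]
  rw [hrow]
  unfold pvInner
  rw [pvSet_map_range _ _ _ _ (by omega : k + 1 < s1.length + 1)]
  apply List.map_congr_left
  intro i _
  by_cases h1 : i = k + 1
  · have h2 : ¬ i ≤ k := by omega
    simp [h1]
  · by_cases h2 : i ≤ k <;> simp [h1, h2]

lemma pvInner_zero (s1 s2 : List Char) (k : Nat) :
    pvInner s1 s2 k 0 = pvDp s1 s2 k := by
  unfold pvInner pvDp
  apply List.map_congr_left
  intro i _
  by_cases h1 : i ≤ k
  · simp [h1]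
  · by_cases h2 : i = k + 1
    · subst h2
      rw [if_neg (show ¬ k + 1 ≤ k by omega), if_pos rfl, if_neg (show ¬ k + 1 ≤ k by omega)]
      rw [List.eq_replicate_iff]
      refine ⟨by simp, ?_⟩
      intro b hb
      simp only [List.mem_map, List.mem_range] at hb
      obtain ⟨x, _, hx⟩ := hb
      rcases Nat.eq_zero_or_pos x with h3 | h3
      · subst h3
        rw [← hx, if_pos (le_refl 0)]
        exact pvNew_getD_zero s1 s2 k
      · rw [← hx, if_neg (by omega)]
    · simp [h1, h2]

lemma pvRow_take_succ (s1 s2 : List Char) (k : Nat) (hk : k < s1.length) :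
    pvRow s2 (s1.take (k + 1)) = pvNew s1 s2 k := by
  have h1 : s1.take (k + 1) = s1.take k ++ [s1.getD k ' '] := by
    rw [List.take_add_one, List.getElem?_eq_getElem hk, List.getD_eq_getElem _ _ hk]
    simp
  rw [h1]
  unfold pvRow pvNew
  rw [List.foldl_append]
  rfl

lemma pvInner_last (s1 s2 : List Char) (k : Nat) (hk : k < s1.length) :
    pvInner s1 s2 k s2.length = pvDp s1 s2 (k + 1) := by
  unfold pvInner pvDp
  apply List.map_congr_left
  intro i _
  by_cases h1 : i ≤ k
  · simp [h1, show i ≤ k + 1 by omega]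
  · by_cases h2 : i = k + 1
    · subst h2
      rw [if_neg (show ¬ k + 1 ≤ k by omega), if_pos rfl, if_pos (le_refl (k + 1))]
      rw [← pvRow_take_succ s1 s2 k hk]
      have hlen : (pvRow s2 (s1.take (k + 1))).length = s2.length + 1 := pvRow_length s2 _
      apply List.ext_getElem
      · simp [hlen]
      · intro x hx1 hx2
        simp only [List.length_map, List.length_range] at hx1
        simp only [List.getElem_map, List.getElem_range]
        rw [if_pos (by omega : x ≤ s2.length)]
        exact List.getD_eq_getElem _ _ hx2
    · simp [h1, h2, show ¬ i ≤ k + 1 by omega]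

lemma pvInner_fold (s1 s2 : List Char) (k : Nat) (hk : k < s1.length) :
    ∀ t, t ≤ s2.length →
      (PySem.List.pyRange 1 ((t : Int) + 1) 1).foldl (pvBody s1 s2 ((k : Int) + 1))
        (pvInner s1 s2 k 0) = pvInner s1 s2 k t := by
  intro t
  induction t with
  | zero =>
    intro _
    have h0 : ((0 : Nat) : Int) + 1 = 1 := by norm_num
    rw [h0, PySem.List.pyRange_one_eq_nil le_rfl, List.foldl_nil]
  | succ t ih =>
    intro h
    have hcast : ((t + 1 : Nat) : Int) + 1 = ((t : Int) + 1) + 1 := by push_cast; ring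
    rw [hcast, PySem.List.pyRange_one_succ_right (by omega), List.foldl_append,
      ih (by omega)]
    have h2 : ((t : Int) + 1) = ((t + 1 : Nat) : Int) := by push_cast; ring
    simp only [List.foldl_cons, List.foldl_nil, h2]
    have h3 := pvInner_step s1 s2 k (t + 1) hk (by omega) h
    simpa using h3

lemma pvDp_zero (s1 s2 : List Char) :
    (PySem.List.pyRange 0 ((s1.length : Int) + 1) 1).map (fun _ =>
      (PySem.List.pyRange 0 ((s2.length : Int) + 1) 1).map (fun _ => (0 : Int)))
    = pvDp s1 s2 0 := by
  have hrow : (PySem.List.pyRange 0 ((s2.length : Int) + 1) 1).map (fun _ => (0 : Int))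
      = List.replicate (s2.length + 1) 0 := by
    rw [List.eq_replicate_iff]
    constructor
    · simp [PySem.List.length_pyRange_one]
    · intro b hb
      simp only [List.mem_map] at hb
      obtain ⟨_, _, hx⟩ := hb
      omega
  rw [hrow]
  have hcast : ((s1.length : Int) + 1) = ((s1.length + 1 : Nat) : Int) := by push_cast; ring
  rw [hcast, PySem.List.pyRange_zero_nat]
  unfold pvDp
  rw [List.map_map]
  apply List.map_congr_left
  intro i hi
  simp only [List.mem_range] at hi
  by_cases h1 : i ≤ 0
  · have h2 : i = 0 := by omega
    simp [h2, pvRow_nil]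
  · simp [h1]

lemma pvOuter_fold (s1 s2 : List Char) :
    ∀ k, k ≤ s1.length →
      (PySem.List.pyRange 1 ((k : Int) + 1) 1).foldl
        (fun dp i => (PySem.List.pyRange 1 ((s2.length : Int) + 1) 1).foldl (pvBody s1 s2 i) dp)
        (pvDp s1 s2 0) = pvDp s1 s2 k := by
  intro k
  induction k with
  | zero =>
    intro _
    have h0 : ((0 : Nat) : Int) + 1 = 1 := by norm_num
    rw [h0]
    conv_lhs => rw [PySem.List.pyRange_one_eq_nil (le_refl (1 : Int))]
    rw [List.foldl_nil]
  | succ k ih =>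
    intro h
    have hcast : ((k + 1 : Nat) : Int) + 1 = ((k : Int) + 1) + 1 := by push_cast; ring
    rw [hcast]
    conv_lhs => rw [PySem.List.pyRange_one_succ_right (show (1 : Int) ≤ (k : Int) + 1 by omega)]
    rw [List.foldl_append, ih (by omega)]
    simp only [List.foldl_cons, List.foldl_nil]
    have hk : k < s1.length := by omega
    have h1 := pvInner_fold s1 s2 k hk s2.length le_rfl
    rw [pvInner_zero] at h1
    rw [h1, pvInner_last s1 s2 k hk]

-- Bridge: A's rows carry exactly the pure LCS values.
lemma pvRow_getD_lcs (s1 s2 : List Char) :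
    ∀ i, i ≤ s1.length → ∀ j, j ≤ s2.length →
      (pvRow s2 (s1.take i)).getD j 0 = pvLcs s1 s2 i j := by
  intro i
  induction i with
  | zero =>
    intro _ j _
    rw [pvLcs]
    simp [pvRow_nil]
  | succ i ih =>
    intro hi
    have hrow : pvRow s2 (s1.take (i + 1)) = pvNext (s1.getD i ' ') s2 (pvRow s2 (s1.take i)) :=
      pvRow_take_succ s1 s2 i (by omega)
    intro j
    induction j with
    | zero =>
      intro _
      rw [hrow, pvLcs]
      simp [pvNext]
    | succ j ihj =>
      intro hj
      rw [hrow]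
      rw [pvNext_getD _ _ _ (pvRow_length s2 _) (j + 1) (by omega) hj]
      rw [pvLcs_eq s1 s2 (i + 1) (j + 1) (by omega)]
      simp only [Nat.add_sub_cancel]
      by_cases hcc : s1.getD i ' ' = s2.getD j ' '
      · rw [if_pos hcc, if_pos hcc, ih (by omega) j (by omega)]
      · rw [if_neg hcc, if_neg hcc, ih (by omega) (j + 1) hj, ← hrow, ihj (by omega)]

-- ===== VERDICT (by name: the statement is the Claim_ definition above) =====
theorem min_operations_to_transform_spec : Claim_equal_min_operations_to_transform := by
  unfold Claim_equal_min_operations_to_transform Spec_min_operations_to_transform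
  intro str1 str2 _
  set s1 := str1.toList with hs1
  set s2 := str2.toList with hs2
  have hAeq : min_operations_to_transform str1 str2 =
      ((s1.length : Nat) : Int)
        - PySem.List.pyGetD (PySem.List.pyGetD
            ((PySem.List.pyRange 1 ((s1.length : Int) + 1) 1).foldl
              (fun dp i => (PySem.List.pyRange 1 ((s2.length : Int) + 1) 1).foldl (pvBody s1 s2 i) dp)
              ((PySem.List.pyRange 0 ((s1.length : Int) + 1) 1).map (fun _ =>
                (PySem.List.pyRange 0 ((s2.length : Int) + 1) 1).map (fun _ => (0 : Int)))))
            ((s1.length : Nat) : Int) []) ((s2.length : Nat) : Int) 0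
        + (((s2.length : Nat) : Int)
          - PySem.List.pyGetD (PySem.List.pyGetD
              ((PySem.List.pyRange 1 ((s1.length : Int) + 1) 1).foldl
                (fun dp i => (PySem.List.pyRange 1 ((s2.length : Int) + 1) 1).foldl (pvBody s1 s2 i) dp)
                ((PySem.List.pyRange 0 ((s1.length : Int) + 1) 1).map (fun _ =>
                  (PySem.List.pyRange 0 ((s2.length : Int) + 1) 1).map (fun _ => (0 : Int)))))
              ((s1.length : Nat) : Int) []) ((s2.length : Nat) : Int) 0) := rfl
  rw [hAeq]
  rw [pvDp_zero, pvOuter_fold s1 s2 s1.length le_rfl]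
  have hlcs : PySem.List.pyGetD (PySem.List.pyGetD (pvDp s1 s2 s1.length) ((s1.length : Nat) : Int) []) ((s2.length : Nat) : Int) 0
      = (pvRow s2 s1).getD s2.length 0 := by
    simp only [PySem.List.pyGetD_natCast]
    unfold pvDp
    rw [PySem.List.getD_map_range _ _ _ _ (by omega)]
    simp [List.take_length]
  rw [hlcs]
  have hArow : (pvRow s2 s1).getD s2.length 0 = pvLcs s1 s2 s1.length s2.length := by
    have := pvRow_getD_lcs s1 s2 s1.length le_rfl s2.length le_rfl
    simpa [List.take_length] using this
  rw [hArow]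
  have hBeq : min_operations_to_transform_alt str1 str2 =
      ((s1.length : Nat) : Int) + ((s2.length : Nat) : Int)
        - 2 * (pvLcsMemo s1 s2 s1.length s2.length PySem.Dict.empty).1 := rfl
  rw [hBeq]
  have hinv : pvInv s1 s2 PySem.Dict.empty := by
    intro a b v hv
    simp [PySem.Dict.get?_empty] at hv
  have hB := (pvMemo_correct s1 s2 (s1.length + s2.length) s1.length s2.length le_rfl
    PySem.Dict.empty hinv).1
  rw [hB]
  ring
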